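-- pv_equiv track=rewrite | github.com/lucashald/uglymidi | ugly_midi/converter.py | split_complex_chord_across_clefs
-- ===== SOURCE A (Python) =====
-- def split_complex_chord_across_clefs(note_group):
--     """
--     Split a complex chord across treble and bass clefs if needed.
--     """
--     if len(note_group) <= 3:
--         return None  # Don't split simple chords
--
--     note_group.sort(key=lambda x: x['midi_note'])
--
--     # Split point around C4 (MIDI 60)
--     bass_notes = [n for n in note_group if n['midi_note'] < 62]  # Below D4
--     treble_notes = [n for n in note_group if n['midi_note'] >= 58]  # Above A#3
--
--     # Only split if both parts have reasonable notes
--     if len(bass_notes) >= 2 and len(treble_notes) >= 2: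
--         return {
--             'bass_part': bass_notes,
--             'treble_part': treble_notes
--         }
--
--     return None
-- ===== SOURCE B (Python) =====
-- def _bisect_left(keys, x):
--     """Leftmost insertion point of x in ascending keys (hand-rolled binary search)."""
--     lo, hi = 0, len(keys)
--     while lo < hi:
--         mid = (lo + hi) // 2
--         if keys[mid] < x:
--             lo = mid + 1
--         else:
--             hi = mid
--     return lo
--
--
-- def split_complex_chord_across_clefs(note_group):
--     """
--     Split a complex chord across treble and bass clefs if needed.
--     (Sorts note_group in place, like the original.)
--     """
--     if len(note_group) <= 3:
--         return None
--
--     note_group.sort(key=lambda x: x['midi_note'])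
--     keys = [n['midi_note'] for n in note_group]
--
--     hi = _bisect_left(keys, 62)   # notes below D4 are exactly note_group[:hi]
--     lo = _bisect_left(keys, 58)   # notes >= A#3 are exactly note_group[lo:]
--
--     if hi >= 2 and len(keys) - lo >= 2:
--         return {
--             'bass_part': note_group[:hi],
--             'treble_part': note_group[lo:]
--         }
--
--     return None
-- ===== Notes on version B (the rewrite author's own statement) =====
-- stated objective: alternative
-- what changed: Replaces A's two linear filter passes over the sorted chord with two hand-rolled binary searches (bisect_left) on the key list plus slicing, exploiting that after the sort the bass and treble parts are contiguous runs.
import Mathlib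
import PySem

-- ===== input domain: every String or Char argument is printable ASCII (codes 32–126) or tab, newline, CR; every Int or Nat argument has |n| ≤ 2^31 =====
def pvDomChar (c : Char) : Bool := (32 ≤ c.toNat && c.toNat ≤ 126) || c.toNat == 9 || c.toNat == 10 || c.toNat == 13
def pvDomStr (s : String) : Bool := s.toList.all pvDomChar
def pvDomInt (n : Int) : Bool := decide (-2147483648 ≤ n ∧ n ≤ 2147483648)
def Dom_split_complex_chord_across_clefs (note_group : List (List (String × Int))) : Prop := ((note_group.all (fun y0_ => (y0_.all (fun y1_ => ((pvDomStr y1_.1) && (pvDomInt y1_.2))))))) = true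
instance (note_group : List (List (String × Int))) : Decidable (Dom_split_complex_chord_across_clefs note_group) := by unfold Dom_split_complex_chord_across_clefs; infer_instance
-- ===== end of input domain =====

-- B replaces A's two linear filter passes over the sorted chord by two binary searches
-- (hand-rolled bisect_left) plus slicing: an alternative algorithm of the same result.
-- Both A and B sort note_group in place (same side effect); the equivalence proved here
-- is about the return value.


-- ===== PORT A =====
-- n['midi_note']: first-match dict lookup; Pre_ guarantees the key is present wherever
-- Python performs the lookup, so the getD default 0 is never the value used.
def midiKey (n : List (String × Int)) : Int :=
  PySem.Dict.getD (PySem.Dict.mk n) "midi_note" 0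

def split_complex_chord_across_clefs (note_group : List (List (String × Int))) : Option (List (String × List (List (String × Int)))) :=
  if note_group.length ≤ 3 then none
  else
    let s := PySem.List.sorted note_group midiKey false
    let bass_notes := s.filter (fun n => midiKey n < 62)
    let treble_notes := s.filter (fun n => 58 ≤ midiKey n)
    if 2 ≤ bass_notes.length ∧ 2 ≤ treble_notes.length then
      some [("bass_part", bass_notes), ("treble_part", treble_notes)]
    else none

-- ===== PORT B =====
-- hand-written binary search from Source B; (lo+hi)//2 on nonnegative ints = Nat division;
-- keys[mid] is in range whenever hi ≤ len keys, the getD default is never used then.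
def bisectLoop (keys : List Int) (x : Int) (lo hi : Nat) : Nat :=
  if _h : lo < hi then
    let mid := (lo + hi) / 2
    if keys.getD mid 0 < x then bisectLoop keys x (mid + 1) hi
    else bisectLoop keys x lo mid
  else lo
termination_by hi - lo
decreasing_by all_goals omega

def split_complex_chord_across_clefs_alt (note_group : List (List (String × Int))) : Option (List (String × List (List (String × Int)))) :=
  if note_group.length ≤ 3 then none
  else
    let s := PySem.List.sorted note_group midiKey false
    let keys := s.map midiKey
    let hi := bisectLoop keys 62 0 keys.length
    let lo := bisectLoop keys 58 0 keys.length
    if 2 ≤ hi ∧ 2 ≤ keys.length - lo then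
      some [("bass_part", PySem.List.slice s none (some (hi : Int))),
            ("treble_part", PySem.List.slice s (some (lo : Int)) none)]
    else none

-- ===== PRECONDITION & SPEC =====
-- Pre_ excludes exactly the inputs where Python A raises KeyError: more than 3 notes and
-- some note without a 'midi_note' key (the sort key lookup raises there).
def Pre_split_complex_chord_across_clefs (note_group : List (List (String × Int))) : Prop :=
  note_group.length ≤ 3 ∨ ∀ n ∈ note_group, (PySem.Dict.mk n).contains "midi_note" = true
instance (note_group : List (List (String × Int))) : Decidable (Pre_split_complex_chord_across_clefs note_group) := by unfold Pre_split_complex_chord_across_clefs; infer_instance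

def pvWitness_split_complex_chord_across_clefs : (List (List (String × Int))) :=
  [[("midi_note", 55)], [("midi_note", 60)], [("midi_note", 64)], [("midi_note", 67)]]

def Spec_split_complex_chord_across_clefs (note_group : List (List (String × Int))) (out : Option (List (String × List (List (String × Int))))) : Prop := out = split_complex_chord_across_clefs_alt note_group
instance (note_group : List (List (String × Int))) (out : Option (List (String × List (List (String × Int))))) : Decidable (Spec_split_complex_chord_across_clefs note_group out) := by unfold Spec_split_complex_chord_across_clefs; infer_instance

-- ===== CLAIM (what is proved, stated in full; the proofs are below) =====
def Claim_equal_split_complex_chord_across_clefs : Prop := ∀ (note_group : List (List (String × Int))), Dom_split_complex_chord_across_clefs note_group → Pre_split_complex_chord_across_clefs note_group → Spec_split_complex_chord_across_clefs note_group (split_complex_chord_across_clefs note_group)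

-- ===== LEMMAS AND PROOFS =====

-- bisectLoop brackets: on a pointwise-monotone keys list, the result r satisfies
-- keys[j] < x for j < r and x <= keys[j] for r <= j.
lemma bisectLoop_spec (keys : List Int) (x : Int)
    (hp : ∀ (i j : Nat) (hi : i < keys.length) (hj : j < keys.length), i ≤ j → keys[i] ≤ keys[j]) :
    ∀ (lo hi : Nat), hi ≤ keys.length → lo ≤ hi →
    (∀ j (hj : j < keys.length), j < lo → keys[j] < x) →
    (∀ j (hj : j < keys.length), hi ≤ j → x ≤ keys[j]) →
    bisectLoop keys x lo hi ≤ hi ∧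
      (∀ j (hj : j < keys.length), j < bisectLoop keys x lo hi → keys[j] < x) ∧
      (∀ j (hj : j < keys.length), bisectLoop keys x lo hi ≤ j → x ≤ keys[j]) := by
  intro lo hi
  induction lo, hi using bisectLoop.induct keys x with
  | case1 lo hi h mid hlt ih =>
    intro hlen hle hlow hhigh
    have hmid : mid = (lo + hi) / 2 := rfl
    have hm2 : (lo + hi) / 2 < hi := by omega
    have hmlen : (lo + hi) / 2 < keys.length := by omega
    rw [hmid] at hlt ih
    rw [List.getD_eq_getElem keys 0 hmlen] at hlt
    rw [bisectLoop]
    simp only [h, dif_pos, if_pos, List.getD_eq_getElem keys 0 hmlen, hlt]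
    exact ih hlen (by omega)
      (fun j hj hjm => lt_of_le_of_lt (hp j ((lo + hi) / 2) hj hmlen (by omega)) hlt)
      hhigh
  | case2 lo hi h mid hge ih =>
    intro hlen hle hlow hhigh
    have hmid : mid = (lo + hi) / 2 := rfl
    have hm2 : (lo + hi) / 2 < hi := by omega
    have hmlen : (lo + hi) / 2 < keys.length := by omega
    rw [hmid] at hge ih
    rw [List.getD_eq_getElem keys 0 hmlen] at hge
    rw [bisectLoop]
    simp only [h, dif_pos, List.getD_eq_getElem keys 0 hmlen, hge]
    have := ih (by omega) (by omega) hlow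
      (fun j hj hjm => le_trans (not_lt.mp hge) (hp ((lo + hi) / 2) j hmlen hj hjm))
    exact ⟨le_trans this.1 (by omega), this.2.1, this.2.2⟩
  | case3 lo hi h =>
    intro hlen hle hlow hhigh
    rw [bisectLoop]
    simp only [h, dif_neg, not_false_iff]
    exact ⟨by omega, hlow, fun j hj hge => hhigh j hj (by omega)⟩

lemma filter_lt_eq_take {α : Type} (s : List α) (key : α → Int) (x : Int) (r : Nat)
    (hr : r ≤ s.length)
    (h1 : ∀ j (hj : j < s.length), j < r → key s[j] < x)
    (h2 : ∀ j (hj : j < s.length), r ≤ j → x ≤ key s[j]) :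
    s.filter (fun n => key n < x) = s.take r := by
  conv_lhs => rw [← List.take_append_drop r s]
  rw [List.filter_append]
  have ht : (s.take r).filter (fun n => decide (key n < x)) = s.take r := by
    rw [List.filter_eq_self]
    intro a ha
    rw [List.mem_iff_getElem] at ha
    obtain ⟨i, hi, hia⟩ := ha
    have hir : i < r := by simp [List.length_take] at hi; omega
    have hilen : i < s.length := by omega
    have hgi : (s.take r)[i] = s[i] := List.getElem_take
    rw [hgi] at hia
    subst hia
    simpa using h1 i hilen hir
  have hd : (s.drop r).filter (fun n => decide (key n < x)) = [] := by
    rw [List.filter_eq_nil_iff]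
    intro a ha
    rw [List.mem_iff_getElem] at ha
    obtain ⟨i, hi, hia⟩ := ha
    have hlen : r + i < s.length := by
      have := hi; simp [List.length_drop] at this; omega
    have hgi : (s.drop r)[i] = s[r + i] := List.getElem_drop
    rw [hgi] at hia
    subst hia
    simpa using h2 (r + i) hlen (by omega)
  rw [ht, hd, List.append_nil]

lemma filter_ge_eq_drop {α : Type} (s : List α) (key : α → Int) (x : Int) (r : Nat)
    (hr : r ≤ s.length)
    (h1 : ∀ j (hj : j < s.length), j < r → key s[j] < x)
    (h2 : ∀ j (hj : j < s.length), r ≤ j → x ≤ key s[j]) :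
    s.filter (fun n => x ≤ key n) = s.drop r := by
  conv_lhs => rw [← List.take_append_drop r s]
  rw [List.filter_append]
  have ht : (s.take r).filter (fun n => decide (x ≤ key n)) = [] := by
    rw [List.filter_eq_nil_iff]
    intro a ha
    rw [List.mem_iff_getElem] at ha
    obtain ⟨i, hi, hia⟩ := ha
    have hir : i < r := by simp [List.length_take] at hi; omega
    have hilen : i < s.length := by omega
    have hgi : (s.take r)[i] = s[i] := List.getElem_take
    rw [hgi] at hia
    subst hia
    simpa using h1 i hilen hir
  have hd : (s.drop r).filter (fun n => decide (x ≤ key n)) = s.drop r := by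
    rw [List.filter_eq_self]
    intro a ha
    rw [List.mem_iff_getElem] at ha
    obtain ⟨i, hi, hia⟩ := ha
    have hlen : r + i < s.length := by
      have := hi; simp [List.length_drop] at this; omega
    have hgi : (s.drop r)[i] = s[r + i] := List.getElem_drop
    rw [hgi] at hia
    subst hia
    simpa using h2 (r + i) hlen (by omega)
  rw [ht, hd, List.nil_append]

-- ===== VERDICT (by name: the statement is the Claim_ definition above) =====
theorem split_complex_chord_across_clefs_spec : Claim_equal_split_complex_chord_across_clefs := by
  intro ng _hdom _hpre
  unfold Spec_split_complex_chord_across_clefs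
  unfold split_complex_chord_across_clefs split_complex_chord_across_clefs_alt
  by_cases hlen : ng.length ≤ 3
  · simp [hlen]
  · simp only [hlen, if_false]
    set s := PySem.List.sorted ng midiKey false with hs
    have hpair : ∀ (i j : Nat) (hi : i < (s.map midiKey).length) (hj : j < (s.map midiKey).length),
        i ≤ j → (s.map midiKey)[i] ≤ (s.map midiKey)[j] := by
      have hpw := PySem.List.sorted_map_key_pairwise ng midiKey
      rw [List.pairwise_iff_getElem] at hpw
      intro i j hi hj hij
      rcases Nat.eq_or_lt_of_le hij with rfl | hlt
      · exact le_refl _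
      · exact hpw i j hi hj hlt
    have hklen : (s.map midiKey).length = s.length := List.length_map ..
    obtain ⟨h62le, h62lt, h62ge⟩ :=
      bisectLoop_spec (s.map midiKey) 62 hpair 0 (s.map midiKey).length le_rfl (Nat.zero_le _)
        (fun j hj hlt => absurd hlt (Nat.not_lt_zero j))
        (fun j hj hge => absurd hj (by omega))
    obtain ⟨h58le, h58lt, h58ge⟩ :=
      bisectLoop_spec (s.map midiKey) 58 hpair 0 (s.map midiKey).length le_rfl (Nat.zero_le _)
        (fun j hj hlt => absurd hlt (Nat.not_lt_zero j))
        (fun j hj hge => absurd hj (by omega))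
    set r62 := bisectLoop (s.map midiKey) 62 0 (s.map midiKey).length with hr62
    set r58 := bisectLoop (s.map midiKey) 58 0 (s.map midiKey).length with hr58
    have h62lt' : ∀ j (hj : j < s.length), j < r62 → midiKey s[j] < 62 := by
      intro j hj hjr
      have := h62lt j (by omega) hjr
      simpa using this
    have h62ge' : ∀ j (hj : j < s.length), r62 ≤ j → (62:Int) ≤ midiKey s[j] := by
      intro j hj hjr
      have := h62ge j (by omega) hjr
      simpa using this
    have h58lt' : ∀ j (hj : j < s.length), j < r58 → midiKey s[j] < 58 := by
      intro j hj hjr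
      have := h58lt j (by omega) hjr
      simpa using this
    have h58ge' : ∀ j (hj : j < s.length), r58 ≤ j → (58:Int) ≤ midiKey s[j] := by
      intro j hj hjr
      have := h58ge j (by omega) hjr
      simpa using this
    have hbass : s.filter (fun n => midiKey n < 62) = s.take r62 :=
      filter_lt_eq_take s midiKey 62 r62 (by omega) h62lt' h62ge'
    have htreble : s.filter (fun n => 58 ≤ midiKey n) = s.drop r58 :=
      filter_ge_eq_drop s midiKey 58 r58 (by omega) h58lt' h58ge'
    have hbl : (s.take r62).length = r62 := by
      simp [List.length_take]; omega
    have htl : (s.drop r58).length = s.length - r58 := List.length_drop ..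
    rw [hbass, htreble, hbl, htl, PySem.List.slice_to_natCast, PySem.List.slice_from_natCast, hklen]
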